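-- pv_equiv track=rewrite | github.com/ensue/most_for_betting | tools/progression.py | current_level
-- ===== SOURCE A (Python) =====
-- LEVEL_THRESHOLDS = [0, 120, 280, 480, 730, 1030, 1380, 1780, 2230, 2730]
--
-- def current_level(total_xp: int) -> int:
--     if total_xp < 0:
--         return 1
--     if total_xp < LEVEL_THRESHOLDS[-1]:
--         for i in range(len(LEVEL_THRESHOLDS) - 1):
--             if LEVEL_THRESHOLDS[i] <= total_xp < LEVEL_THRESHOLDS[i + 1]:
--                 return i + 1
--         return len(LEVEL_THRESHOLDS)
--     extra = total_xp - LEVEL_THRESHOLDS[-1]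
--     return 10 + (extra // 550)
-- ===== SOURCE B (Python) =====
-- LEVEL_THRESHOLDS = [0, 120, 280, 480, 730, 1030, 1380, 1780, 2230, 2730]
--
-- def current_level(total_xp: int) -> int:
--     if total_xp < 0:
--         return 1
--     if total_xp >= LEVEL_THRESHOLDS[-1]:
--         return 10 + (total_xp - LEVEL_THRESHOLDS[-1]) // 550
--     # binary search (bisect_right by hand): number of thresholds <= total_xp
--     lo, hi = 0, len(LEVEL_THRESHOLDS)
--     while lo < hi:
--         mid = (lo + hi) // 2
--         if LEVEL_THRESHOLDS[mid] <= total_xp: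
--             lo = mid + 1
--         else:
--             hi = mid
--     return lo
-- ===== Notes on version B (the rewrite author's own statement) =====
-- stated objective: idiomatic
-- what changed: Replaces the explicit interval-matching scan over threshold pairs with a bisect_right-style binary search (hand-written, no imports) that counts thresholds <= total_xp; the negative guard and the overflow formula are kept.
import Mathlib
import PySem

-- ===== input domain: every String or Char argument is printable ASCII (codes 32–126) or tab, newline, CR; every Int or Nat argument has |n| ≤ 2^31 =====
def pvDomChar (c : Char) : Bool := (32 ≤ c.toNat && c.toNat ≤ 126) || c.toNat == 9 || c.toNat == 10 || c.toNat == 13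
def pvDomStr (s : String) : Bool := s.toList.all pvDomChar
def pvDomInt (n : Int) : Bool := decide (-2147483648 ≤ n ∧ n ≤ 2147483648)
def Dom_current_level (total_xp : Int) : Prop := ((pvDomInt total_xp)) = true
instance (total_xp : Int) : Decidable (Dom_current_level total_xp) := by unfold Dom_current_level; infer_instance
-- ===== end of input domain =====

-- B replaces A's linear interval scan with a hand-written bisect_right binary search; same return value everywhere.
-- B replaces A's linear interval scan with a hand-written bisect_right-style binary search; same return value everywhere.
-- ===== PORT A =====
def pvThresh : List Int := [0, 120, 280, 480, 730, 1030, 1380, 1780, 2230, 2730]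

-- the 'for i in range(len(LEVEL_THRESHOLDS) - 1)' loop with early return, over the range list;
-- LEVEL_THRESHOLDS[i] is always in range here, so the .getD 0 default is never taken
def pvScan (total_xp : Int) : List Int → Int
  | [] => 10  -- 'return len(LEVEL_THRESHOLDS)' after the loop
  | i :: rest =>
    if (PySem.List.pyGet? pvThresh i).getD 0 ≤ total_xp ∧
       total_xp < (PySem.List.pyGet? pvThresh (i+1)).getD 0 then i + 1
    else pvScan total_xp rest

def current_level (total_xp : Int) : Int :=
  if total_xp < 0 then 1
  else if total_xp < (PySem.List.pyGet? pvThresh (-1)).getD 0 then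
    pvScan total_xp (PySem.List.pyRange 0 9 1)
  else 10 + PySem.Int.floordiv (total_xp - (PySem.List.pyGet? pvThresh (-1)).getD 0) 550

-- ===== PORT B =====
-- Source B's 'while lo < hi' binary search; lo/hi are Nat list bounds (0 ≤ lo ≤ hi ≤ 10 throughout,
-- so Nat '/' 2 agrees with Python's '//'); fuel 10 exceeds the ≤ 5 iterations the loop can make
def pvBisect (total_xp : Int) : Nat → Nat → Nat → Nat
  | 0, lo, _ => lo
  | fuel+1, lo, hi =>
    if lo < hi then
      let mid := (lo + hi) / 2
      if pvThresh.getD mid 0 ≤ total_xp then pvBisect total_xp fuel (mid + 1) hi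
      else pvBisect total_xp fuel lo mid
    else lo

def current_level_alt (total_xp : Int) : Int :=
  if total_xp < 0 then 1
  else if (PySem.List.pyGet? pvThresh (-1)).getD 0 ≤ total_xp then
    10 + PySem.Int.floordiv (total_xp - (PySem.List.pyGet? pvThresh (-1)).getD 0) 550
  else (pvBisect total_xp 10 0 10 : Int)

-- ===== PRECONDITION & SPEC =====
def Spec_current_level (total_xp : Int) (out : Int) : Prop := out = current_level_alt total_xp
instance (total_xp : Int) (out : Int) : Decidable (Spec_current_level total_xp out) := by unfold Spec_current_level; infer_instance

-- ===== CLAIM (what is proved, stated in full; the proofs are below) =====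
def Claim_equal_current_level : Prop := ∀ (total_xp : Int), Dom_current_level total_xp → Spec_current_level total_xp (current_level total_xp)

-- ===== LEMMAS AND PROOFS =====
set_option maxHeartbeats 1000000 in
lemma pv_mid_eq (x : Int) (h0 : 0 ≤ x) (h1 : x < 2730) :
    pvScan x (PySem.List.pyRange 0 9 1) = (pvBisect x 10 0 10 : Int) := by
  have hr : PySem.List.pyRange 0 9 1 = [0,1,2,3,4,5,6,7,8] := by decide
  rw [hr]
  simp [pvScan, pvBisect, pvThresh, PySem.List.pyGet?, PySem.List.pyIdx?]
  split_ifs <;> omega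

-- ===== VERDICT (by name: the statement is the Claim_ definition above) =====
theorem current_level_spec : Claim_equal_current_level := by
  intro x _
  unfold Spec_current_level current_level current_level_alt
  by_cases hneg : x < 0
  · simp [hneg]
  · have h2730 : ((PySem.List.pyGet? pvThresh (-1)).getD 0 : Int) = 2730 := by decide
    by_cases hbig : x < 2730
    · rw [if_neg hneg, if_neg hneg, if_pos (h2730 ▸ hbig), if_neg (by omega : ¬ ((PySem.List.pyGet? pvThresh (-1)).getD 0 : Int) ≤ x)]
      exact pv_mid_eq x (by omega) hbig
    · rw [if_neg hneg, if_neg hneg, if_neg (h2730 ▸ hbig), if_pos (by omega : ((PySem.List.pyGet? pvThresh (-1)).getD 0 : Int) ≤ x)]
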